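-- pv_equiv track=rewrite | github.com/Yassa777/PolytopeSAE | polytope_hsae/sanity_checker.py | _determine_primary_fix
-- ===== SOURCE A (Python) =====
-- from typing import Dict, List, Optional, Tuple
--
-- def _determine_primary_fix(issues: List[Dict]) -> str:
--     """Determine the primary fix to apply based on issue severity and type."""
--     # Priority order: router_temp > width > capacity
--     for issue in issues:
--         if issue['suggested_fix'] == 'increase_router_temp':
--             return 'increase_router_temp'
--
--     for issue in issues:
--         if issue['suggested_fix'] == 'increase_width':
--             return 'increase_width'
--
--     for issue in issues:
--         if issue['suggested_fix'] == 'increase_capacity':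
--             return 'increase_capacity'
--
--     return 'increase_router_temp'  # Default
-- ===== SOURCE B (Python) =====
-- def _determine_primary_fix(issues):
--     """One in-order pass with flags instead of three priority scans."""
--     saw_width = False
--     saw_capacity = False
--     for issue in issues:
--         fix = issue['suggested_fix']
--         if fix == 'increase_router_temp':
--             return 'increase_router_temp'
--         if fix == 'increase_width':
--             saw_width = True
--         elif fix == 'increase_capacity':
--             saw_capacity = True
--     if saw_width:
--         return 'increase_width'
--     if saw_capacity:
--         return 'increase_capacity'
--     return 'increase_router_temp'
-- ===== Notes on version B (the rewrite author's own statement) =====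
-- stated objective: simpler
-- what changed: Three priority-ordered scans over the issue list are replaced by a single in-order pass that early-returns on router_temp and tracks saw_width/saw_capacity flags, deciding after the loop.
import Mathlib
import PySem

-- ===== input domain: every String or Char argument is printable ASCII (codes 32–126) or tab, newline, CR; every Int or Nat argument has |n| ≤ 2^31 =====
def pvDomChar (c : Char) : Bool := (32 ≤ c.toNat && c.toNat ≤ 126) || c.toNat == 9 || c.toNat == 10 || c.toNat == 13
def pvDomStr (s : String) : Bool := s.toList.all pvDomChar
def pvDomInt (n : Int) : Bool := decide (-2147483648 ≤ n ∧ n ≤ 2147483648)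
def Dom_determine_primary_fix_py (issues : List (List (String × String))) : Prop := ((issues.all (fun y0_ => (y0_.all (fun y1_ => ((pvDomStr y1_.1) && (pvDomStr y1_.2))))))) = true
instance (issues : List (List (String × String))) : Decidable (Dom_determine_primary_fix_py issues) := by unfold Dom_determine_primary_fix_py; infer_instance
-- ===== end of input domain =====

-- B is one in-order pass with flags instead of A's three priority scans; equivalence is about the return value.

-- ===== PORT A =====
-- issue['suggested_fix']: first-match lookup in the assoc list; 'none' is Python's KeyError,
-- totalised here to "" (a value no branch matches) — Pre_ excludes exactly the raising inputs.
def pvFix (issue : List (String × String)) : String :=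
  (PySem.Dict.mk issue).getD "suggested_fix" ""

-- each of A's three 'for' loops: scan for one target, early return
def pvScanA (issues : List (List (String × String))) (target : String) : Bool :=
  match issues with
  | [] => false
  | issue :: rest => if pvFix issue == target then true else pvScanA rest target

def determine_primary_fix_py (issues : List (List (String × String))) : String :=
  if pvScanA issues "increase_router_temp" then "increase_router_temp"
  else if pvScanA issues "increase_width" then "increase_width"
  else if pvScanA issues "increase_capacity" then "increase_capacity"
  else "increase_router_temp"

-- ===== PORT B =====
-- single loop carrying the saw_width / saw_capacity flags, early return on router_temp
def pvLoopB (issues : List (List (String × String))) (saw_width saw_capacity : Bool) : String :=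
  match issues with
  | [] =>
    if saw_width then "increase_width"
    else if saw_capacity then "increase_capacity"
    else "increase_router_temp"
  | issue :: rest =>
    let fix := pvFix issue
    if fix == "increase_router_temp" then "increase_router_temp"
    else if fix == "increase_width" then pvLoopB rest true saw_capacity
    else if fix == "increase_capacity" then pvLoopB rest saw_width true
    else pvLoopB rest saw_width saw_capacity

def determine_primary_fix_py_alt (issues : List (List (String × String))) : String :=
  pvLoopB issues false false

-- ===== PRECONDITION & SPEC =====
-- Pre_ excludes exactly the inputs where Python A raises KeyError: an issue without the
-- 'suggested_fix' key that is reached before any router_temp issue short-circuits the scan.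
def Pre_determine_primary_fix_py (issues : List (List (String × String))) : Prop :=
  ∀ i < issues.length, (PySem.Dict.mk issues[i]!).get? "suggested_fix" = none →
    ∃ j < i, (PySem.Dict.mk issues[j]!).get? "suggested_fix" = some "increase_router_temp"
instance (issues : List (List (String × String))) : Decidable (Pre_determine_primary_fix_py issues) := by unfold Pre_determine_primary_fix_py; infer_instance

def pvWitness_determine_primary_fix_py : (List (List (String × String))) :=
  [[("suggested_fix", "increase_width")], [("suggested_fix", "increase_capacity")]]

def Spec_determine_primary_fix_py (issues : List (List (String × String))) (out : String) : Prop := out = determine_primary_fix_py_alt issues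
instance (issues : List (List (String × String))) (out : String) : Decidable (Spec_determine_primary_fix_py issues out) := by unfold Spec_determine_primary_fix_py; infer_instance

-- ===== CLAIM (what is proved, stated in full; the proofs are below) =====
def Claim_equal_determine_primary_fix_py : Prop := ∀ (issues : List (List (String × String))), Dom_determine_primary_fix_py issues → Pre_determine_primary_fix_py issues → Spec_determine_primary_fix_py issues (determine_primary_fix_py issues)

-- ===== LEMMAS AND PROOFS =====
-- characterisation of B's loop by the three scans (holds for all flag values)
theorem pvLoopB_eq (issues : List (List (String × String))) :
    ∀ (w c : Bool), pvLoopB issues w c =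
      if pvScanA issues "increase_router_temp" then "increase_router_temp"
      else if w || pvScanA issues "increase_width" then "increase_width"
      else if c || pvScanA issues "increase_capacity" then "increase_capacity"
      else "increase_router_temp" := by
  induction issues with
  | nil => intro w c; simp [pvLoopB, pvScanA]
  | cons issue rest ih =>
    intro w c
    simp only [pvLoopB, pvScanA]
    by_cases h1 : pvFix issue == "increase_router_temp"
    · simp [h1]
    · by_cases h2 : pvFix issue == "increase_width"
      · simp [h1, h2, ih]
      · by_cases h3 : pvFix issue == "increase_capacity"
        · simp [h1, h2, h3, ih]
        · simp [h1, h2, h3, ih]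

-- ===== VERDICT (by name: the statement is the Claim_ definition above) =====
theorem determine_primary_fix_py_spec : Claim_equal_determine_primary_fix_py := by
  intro issues _ _
  unfold Spec_determine_primary_fix_py determine_primary_fix_py determine_primary_fix_py_alt
  rw [pvLoopB_eq]
  simp
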